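-- pv_equiv track=rewrite | github.com/RTB456/polyAcapture | polyC.py | find_poly_c
-- ===== SOURCE A (Python) =====
-- def find_poly_c(sequence, length=5):
--     poly_c_ranges = []
--     seq_str = str(sequence)
--     i = 0
--     while i < len(seq_str):
--         if seq_str[i:i+length] == 'C' * length:
--             start = i + 1  # 1-based indexing
--             end = i + length
--             poly_c_ranges.append((start, end))
--             i += length  # Move past this poly-C sequence
--         else:
--             i += 1
--     return poly_c_ranges
-- ===== SOURCE B (Python) =====
-- def find_poly_c(sequence, length=5):
--     seq_str = str(sequence)
--     n = len(seq_str)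
--     blocks = []
--     run_start = 0
--     for pos in range(n + 1):
--         if pos == n or seq_str[pos] != 'C':
--             run_len = pos - run_start
--             for k in range(run_len // length):
--                 s = run_start + k * length
--                 blocks.append((s + 1, s + length))
--             run_start = pos + 1
--     return blocks
-- ===== Notes on version B (the rewrite author's own statement) =====
-- stated objective: faster
-- what changed: Instead of re-comparing a length-k slice against 'C'*k at every position, B makes a single character-level pass that tracks maximal runs of 'C' and emits run_len//length tiled blocks at each run end.
-- outside the precondition, e.g. on find_poly_c('', 0): A returns [], B raises ZeroDivisionError; on find_poly_c('', -1): A returns [], B returns []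
import Mathlib
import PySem

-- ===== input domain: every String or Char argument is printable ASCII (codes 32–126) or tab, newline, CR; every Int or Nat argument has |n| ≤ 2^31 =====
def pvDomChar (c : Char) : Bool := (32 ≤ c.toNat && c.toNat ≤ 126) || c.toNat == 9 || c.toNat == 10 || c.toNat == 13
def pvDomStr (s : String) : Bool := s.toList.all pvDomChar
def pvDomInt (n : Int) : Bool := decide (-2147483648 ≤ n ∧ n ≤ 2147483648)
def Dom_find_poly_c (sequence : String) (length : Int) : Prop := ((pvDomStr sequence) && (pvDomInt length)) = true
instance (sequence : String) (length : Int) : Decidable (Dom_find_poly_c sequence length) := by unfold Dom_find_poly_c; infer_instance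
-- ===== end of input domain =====

-- B replaces A's per-position slice comparison by a single pass over maximal runs of 'C',
-- emitting run_len // length tiled blocks at each run end (objective: faster).

-- ===== PORT A =====
-- the while loop of A; fuel = number of remaining iterations (under Pre_, i advances by
-- at least 1 per iteration, so fuel = len(seq) always suffices)
def findPolyCLoop (cs : List Char) (length : Int) :
    Nat → Int → List (Int × Int) → List (Int × Int)
  | 0, _, acc => acc
  | fuel + 1, i, acc =>
    if i < (cs.length : Int) then
      if PySem.List.slice cs (some i) (some (i + length)) = PySem.List.pyRepeat ['C'] length then
        findPolyCLoop cs length fuel (i + length) (acc ++ [(i + 1, i + length)])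
      else
        findPolyCLoop cs length fuel (i + 1) acc
    else acc

def find_poly_c (sequence : String) (length : Int) : List (Int × Int) :=
  findPolyCLoop sequence.toList length sequence.toList.length 0 []

-- ===== PORT B =====
-- body of B's for-loop: state = (run_start, blocks); at a run end (pos == n or a non-'C'
-- character) append run_len // length tiled blocks and restart the run after pos
def pcStep (cs : List Char) (n length : Int)
    (st : Int × List (Int × Int)) (pos : Int) : Int × List (Int × Int) :=
  if pos = n ∨ PySem.List.pyGetD cs pos ' ' ≠ 'C' then
    (pos + 1,
     (PySem.List.pyRange 0 (PySem.Int.floordiv (pos - st.1) length) 1).foldl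
       (fun b k => b ++ [(st.1 + k * length + 1, st.1 + k * length + length)]) st.2)
  else st

def find_poly_c_alt (sequence : String) (length : Int) : List (Int × Int) :=
  let cs := sequence.toList
  let n : Int := PySem.List.len cs
  ((PySem.List.pyRange 0 (n + 1) 1).foldl (pcStep cs n length) (0, [])).2

-- ===== PRECONDITION & SPEC =====
-- Pre_ excludes length ≤ 0: there A's loop never advances past a match of the empty pattern,
-- so A diverges on every nonempty sequence; on the empty sequence A returns [] but B raises
-- ZeroDivisionError when length = 0 (and returns [] itself for length < 0).
def Pre_find_poly_c (sequence : String) (length : Int) : Prop := 1 ≤ length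
instance (sequence : String) (length : Int) : Decidable (Pre_find_poly_c sequence length) := by
  unfold Pre_find_poly_c; infer_instance

def pvWitness_find_poly_c : String × Int := ("ACCCCCCGCC", 3)

def Spec_find_poly_c (sequence : String) (length : Int) (out : List (Int × Int)) : Prop :=
  out = find_poly_c_alt sequence length
instance (sequence : String) (length : Int) (out : List (Int × Int)) :
    Decidable (Spec_find_poly_c sequence length out) := by unfold Spec_find_poly_c; infer_instance

-- ===== CLAIM (what is proved, stated in full; the proofs are below) =====
def Claim_equal_find_poly_c : Prop :=
  ∀ (sequence : String) (length : Int), Dom_find_poly_c sequence length →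
    Pre_find_poly_c sequence length →
    Spec_find_poly_c sequence length (find_poly_c sequence length)

-- ===== LEMMAS AND PROOFS =====

-- canonical poly-C block list, structurally recursive on the character list
def polyBlocks (L o : Int) : List Char → List (Int × Int)
  | [] => []
  | c :: t =>
    if List.take L.toNat (c :: t) = List.replicate L.toNat 'C' then
      (o + 1, o + L) :: polyBlocks L (o + L) (List.drop (L.toNat - 1) t)
    else polyBlocks L (o + 1) t
termination_by cs => cs.length
decreasing_by
  · simpa using Nat.lt_succ_of_le (List.length_drop_le _ _)
  · simp

-- the q tiled blocks of a run starting at offset o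
def tile (L o : Int) (q : Nat) : List (Int × Int) :=
  (List.range q).map (fun (k : Nat) => (o + (k : Int) * L + 1, o + (k : Int) * L + L))

theorem tile_succ (L o : Int) (q : Nat) :
    tile L o (q + 1) = (o + 1, o + L) :: tile L (o + L) q := by
  apply List.ext_getElem
  · simp [tile]
  · intro i h1 h2
    cases i with
    | zero =>
      simp only [tile, List.getElem_map, List.getElem_range, List.getElem_cons_zero]
      norm_num
    | succ j =>
      simp only [tile, List.getElem_map, List.getElem_range, List.getElem_cons_succ,
        Prod.mk.injEq]
      constructor <;> push_cast <;> ring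

lemma take_ne_replicate (Lt c : Nat) (h1 : 1 ≤ Lt) (hc : c < Lt) (rest : List Char)
    (hrest : ∀ d t, rest = d :: t → d ≠ 'C') :
    List.take Lt (List.replicate c 'C' ++ rest) ≠ List.replicate Lt 'C' := by
  intro h
  cases rest with
  | nil =>
    have := congrArg List.length h
    simp at this
    omega
  | cons d t =>
    have := congrArg (fun l => l[c]?) h
    simp [List.getElem?_take, hc, List.getElem?_append_right] at this
    exact hrest d t rfl this

theorem polyBlocks_run (L : Int) (hL : 1 ≤ L) :
    ∀ (c : Nat) (rest : List Char), (∀ d t, rest = d :: t → d ≠ 'C') → ∀ o : Int,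
      polyBlocks L o (List.replicate c 'C' ++ rest) =
        tile L o (c / L.toNat) ++
          (match rest with
           | [] => []
           | _ :: t => polyBlocks L (o + c + 1) t) := by
  intro c
  induction c using Nat.strong_induction_on with
  | _ c IH =>
    intro rest hrest o
    have hLt : 1 ≤ L.toNat := by omega
    have hLL : (L.toNat : Int) = L := Int.toNat_of_nonneg (by omega)
    by_cases hc : L.toNat ≤ c
    · -- enough C's: one block is emitted
      obtain ⟨c', rfl⟩ : ∃ c', c = c' + 1 := ⟨c - 1, by omega⟩
      rw [List.replicate_succ, List.cons_append, polyBlocks]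
      have htake : List.take L.toNat (('C' :: (List.replicate c' 'C' ++ rest))) =
          List.replicate L.toNat 'C' := by
        rw [← List.cons_append, ← List.replicate_succ,
          List.take_append_of_le_length (by simp; omega), List.take_replicate]
        congr 1
        omega
      rw [if_pos htake]
      have hdrop : List.drop (L.toNat - 1) (List.replicate c' 'C' ++ rest) =
          List.replicate (c' + 1 - L.toNat) 'C' ++ rest := by
        rw [List.drop_append_of_le_length (by simp; omega), List.drop_replicate]
        congr 2
        omega
      rw [hdrop, IH (c' + 1 - L.toNat) (by omega) rest hrest (o + L)]
      have hdiv : (c' + 1) / L.toNat = (c' + 1 - L.toNat) / L.toNat + 1 := by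
        rw [Nat.div_eq_sub_div (by omega) hc]
      rw [hdiv, tile_succ]
      simp only [List.cons_append, List.cons.injEq, true_and]
      congr 1
      cases rest with
      | nil => rfl
      | cons d t =>
        simp only
        congr 1
        push_cast [hLL]
        omega
    · -- fewer than L C's: characters are skipped one by one
      cases c with
      | zero =>
        cases rest with
        | nil => simp [polyBlocks, tile]
        | cons d t =>
          rw [List.replicate_zero, List.nil_append, polyBlocks,
            if_neg (by
              have := take_ne_replicate L.toNat 0 hLt (by omega) (d :: t) hrest
              simpa using this)]
          simp [tile]
      | succ c' =>
        rw [List.replicate_succ, List.cons_append, polyBlocks,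
          if_neg (by
            have := take_ne_replicate L.toNat (c' + 1) hLt (by omega) rest hrest
            rwa [List.replicate_succ, List.cons_append] at this)]
        rw [IH c' (by omega) rest hrest (o + 1)]
        rw [Nat.div_eq_of_lt (by omega), Nat.div_eq_of_lt (by omega)]
        simp only [tile, List.range_zero, List.map_nil, List.nil_append]
        cases rest with
        | nil => rfl
        | cons d t =>
          simp only
          congr 2
          push_cast
          ring

theorem loopA_eq (cs : List Char) (L : Int) (hL : 1 ≤ L) :
    ∀ (fuel : Nat) (i : Int) (acc : List (Int × Int)), 0 ≤ i →
      ((cs.length : Int) - i).toNat ≤ fuel →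
      findPolyCLoop cs L fuel i acc = acc ++ polyBlocks L i (List.drop i.toNat cs) := by
  intro fuel
  induction fuel with
  | zero =>
    intro i acc hi hfuel
    have : cs.length ≤ i.toNat := by omega
    rw [findPolyCLoop, List.drop_of_length_le this, polyBlocks]
    simp
  | succ fuel IH =>
    intro i acc hi hfuel
    rw [findPolyCLoop]
    by_cases hin : i < (cs.length : Int)
    · rw [if_pos hin]
      have hidx : i.toNat < cs.length := by omega
      have hdecomp : List.drop i.toNat cs = cs[i.toNat] :: List.drop (i.toNat + 1) cs :=
        (List.getElem_cons_drop hidx).symm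
      have hslice : PySem.List.slice cs (some i) (some (i + L)) =
          List.take L.toNat (List.drop i.toNat cs) := by
        rw [PySem.List.slice_toNat cs hi (by omega : (0:Int) ≤ i + L)]
        congr 1
        omega
      have hrep : PySem.List.pyRepeat ['C'] L = List.replicate L.toNat 'C' :=
        PySem.List.pyRepeat_singleton _ _
      by_cases hmatch : List.take L.toNat (List.drop i.toNat cs) = List.replicate L.toNat 'C'
      · rw [if_pos (by rw [hslice, hrep]; exact hmatch)]
        rw [IH (i + L) _ (by omega) (by omega)]
        rw [hdecomp, polyBlocks, if_pos (by rwa [← hdecomp])]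
        have : List.drop (L.toNat - 1) (List.drop (i.toNat + 1) cs) =
            List.drop ((i + L).toNat) cs := by
          rw [List.drop_drop]
          congr 1
          omega
        rw [this]
        simp
      · rw [if_neg (by rw [hslice, hrep]; exact hmatch)]
        rw [IH (i + 1) _ (by omega) (by omega)]
        rw [hdecomp, polyBlocks, if_neg (by rwa [← hdecomp])]
        have h1 : (i + 1).toNat = i.toNat + 1 := by omega
        rw [h1]
    · rw [if_neg hin]
      have : cs.length ≤ i.toNat := by omega
      rw [List.drop_of_length_le this, polyBlocks]
      simp

theorem drop_eq_replicate_append (cs : List Char) (a b : Nat) (hab : a ≤ b)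
    (hb : b ≤ cs.length) (h : ∀ j : Nat, a ≤ j → j < b → cs[j]? = some 'C') :
    List.drop a cs = List.replicate (b - a) 'C' ++ List.drop b cs := by
  have htd : List.drop a cs = List.take (b - a) (List.drop a cs) ++
      List.drop (b - a) (List.drop a cs) := (List.take_append_drop _ _).symm
  rw [htd, List.drop_drop]
  have h2 : a + (b - a) = b := by omega
  rw [h2]
  congr 1
  apply List.ext_getElem
  · simp; omega
  · intro i h1' h2'
    have hlen : i < b - a := by simpa using h2'
    have := h (a + i) (by omega) (by omega)
    rw [List.getElem_take, List.getElem_drop]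
    rw [List.getElem_replicate]
    have hg : cs[a + i]'(by omega) = 'C' := by
      have := h (a + i) (by omega) (by omega)
      simpa [List.getElem?_eq_getElem (by omega : a + i < cs.length)] using this
    simpa using hg

theorem inner_fold_eq_tile (L : Int) (hL : 1 ≤ L) (r p : Nat) (hrp : r ≤ p)
    (acc : List (Int × Int)) :
    (PySem.List.pyRange 0 (PySem.Int.floordiv ((p : Int) - (r : Int)) L) 1).foldl
      (fun b k => b ++ [((r : Int) + k * L + 1, (r : Int) + k * L + L)]) acc
      = acc ++ tile L r ((p - r) / L.toNat) := by
  have hLL : (L.toNat : Int) = L := Int.toNat_of_nonneg (by omega)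
  have h1 : (p : Int) - (r : Int) = ((p - r : Nat) : Int) := by omega
  rw [h1, ← hLL, PySem.Int.floordiv_natCast, PySem.List.pyRange_zero_nat,
    List.foldl_map, hLL]
  rw [show (fun (b : List (Int × Int)) (k : Nat) =>
      b ++ [((r : Int) + (k : Int) * L + 1, (r : Int) + (k : Int) * L + L)]) =
    (fun b k => b ++ [(fun (k : Nat) => ((r : Int) + (k : Int) * L + 1,
      (r : Int) + (k : Int) * L + L)) k]) from rfl]
  rw [PySem.List.foldl_append_singleton_eq_map]
  rfl

theorem foldB_eq (cs : List Char) (L : Int) (hL : 1 ≤ L) :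
    ∀ (k p r : Nat) (acc : List (Int × Int)), cs.length + 1 = p + k → r ≤ p →
      p ≤ cs.length → (∀ j : Nat, r ≤ j → j < p → cs[j]? = some 'C') →
      ((PySem.List.pyRange (p : Int) ((cs.length : Int) + 1) 1).foldl
          (pcStep cs (cs.length : Int) L) ((r : Int), acc)).2
        = acc ++ polyBlocks L r (List.drop r cs) := by
  intro k
  induction k with
  | zero => intro p r acc hk h1 h2 h3; omega
  | succ k IH =>
    intro p r acc hk hrp hp hrun
    rw [PySem.List.pyRange_one_cons (by exact_mod_cast by omega : (p : Int) < (cs.length : Int) + 1)]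
    rw [List.foldl_cons]
    by_cases hend : p = cs.length ∨ ¬ cs[p]? = some 'C'
    · -- run ends at p
      have hcond : (p : Int) = (cs.length : Int) ∨ PySem.List.pyGetD cs (p : Int) ' ' ≠ 'C' := by
        by_cases hpl : p = cs.length
        · exact Or.inl (by exact_mod_cast hpl)
        · have h : ¬ cs[p]? = some 'C' := by
            rcases hend with h | h
            · exact absurd h hpl
            · exact h
          right
          have hplen : p < cs.length := by omega
          rw [PySem.List.pyGetD_natCast]
          rw [List.getD_eq_getElem?_getD, List.getElem?_eq_getElem hplen]
          intro hEq
          simp only [Option.getD_some] at hEq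
          exact h (by rw [List.getElem?_eq_getElem hplen, hEq])
      rw [show pcStep cs (cs.length : Int) L ((r : Int), acc) (p : Int) =
          ((p : Int) + 1, acc ++ tile L r ((p - r) / L.toNat)) from by
        rw [pcStep, if_pos hcond]
        exact congrArg _ (inner_fold_eq_tile L hL r p hrp acc)]
      have hdropr : List.drop r cs = List.replicate (p - r) 'C' ++ List.drop p cs :=
        drop_eq_replicate_append cs r p hrp hp (fun j h1 h2 => hrun j h1 h2)
      rcases Nat.eq_or_lt_of_le hp with hpe | hplt
      · -- p = cs.length : last position, rest of the range is empty
        subst hpe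
        rw [PySem.List.pyRange_one_eq_nil le_rfl, List.foldl_nil]
        rw [hdropr, List.drop_length]
        rw [polyBlocks_run L hL (cs.length - r) [] (by intro d t h; cases h) (r : Int)]
        simp
      · -- p < cs.length and cs[p] ≠ 'C'
        have hne : ¬ cs[p]? = some 'C' := by
          rcases hend with h | h
          · omega
          · exact h
        have hdropp : List.drop p cs = cs[p]'hplt :: List.drop (p + 1) cs :=
          (List.getElem_cons_drop hplt).symm
        have hstep : ((p : Int) + 1) = (((p + 1 : Nat) : Int)) := by push_cast; ring
        rw [hstep, IH (p + 1) (p + 1) _ (by omega) le_rfl (by omega) (by omega)]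
        rw [hdropr, hdropp,
          polyBlocks_run L hL (p - r) (cs[p]'hplt :: List.drop (p + 1) cs)
            (by
              intro d t hdt hdC
              apply hne
              rw [List.getElem?_eq_getElem hplt]
              rw [List.cons.injEq] at hdt
              rw [hdt.1, hdC])
            (r : Int)]
        simp only [List.append_assoc]
        congr 3
        push_cast
        omega
    · -- cs[p] = 'C' : the run continues
      push_neg at hend
      obtain ⟨hpne, hC⟩ := hend
      have hplt : p < cs.length := by omega
      have hcond : ¬ ((p : Int) = (cs.length : Int) ∨
          PySem.List.pyGetD cs (p : Int) ' ' ≠ 'C') := by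
        push_neg
        constructor
        · exact_mod_cast hpne
        · rw [PySem.List.pyGetD_natCast, List.getD_eq_getElem?_getD, hC]
          rfl
      rw [show pcStep cs (cs.length : Int) L ((r : Int), acc) (p : Int) = ((r : Int), acc) from by
        rw [pcStep, if_neg hcond]]
      have hstep : ((p : Int) + 1) = (((p + 1 : Nat) : Int)) := by push_cast; ring
      rw [hstep, IH (p + 1) r acc (by omega) (by omega) (by omega)
        (by
          intro j h1 h2
          rcases Nat.lt_or_ge j p with h' | h'
          · exact hrun j h1 h'
          · have : j = p := by omega
            rw [this]; exact hC)]

-- ===== VERDICT (by name: the statement is the Claim_ definition above) =====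
theorem find_poly_c_spec : Claim_equal_find_poly_c := by
  intro s L _ hL
  have hL1 : 1 ≤ L := hL
  have hA := loopA_eq s.toList L hL1 s.toList.length 0 [] le_rfl (by simp)
  have hB := foldB_eq s.toList L hL1 (s.toList.length + 1) 0 0 [] (by omega) (by omega)
    (by omega) (by omega)
  unfold Spec_find_poly_c find_poly_c find_poly_c_alt
  simp only [PySem.List.len_eq]
  rw [hA]
  simp only [Nat.cast_zero] at hB
  rw [hB]
  simp
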